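-- pv_equiv track=rewrite | github.com/Athenaie21/SemanPartmesh | extract_quad.py | choose_catmull_clark_iters
-- ===== SOURCE A (Python) =====
-- def choose_catmull_clark_iters(current_quads, target_quads, max_iters):
--     if target_quads is None or target_quads <= 0 or current_quads <= 0 or max_iters <= 0:
--         return 0
--
--     best_iter = 0
--     best_diff = abs(current_quads - target_quads)
--     for iters in range(1, max_iters + 1):
--         candidate = current_quads * (4 ** iters)
--         diff = abs(candidate - target_quads)
--         if diff < best_diff:
--             best_diff = diff
--             best_iter = iters
--     return best_iter
-- ===== SOURCE B (Python) =====
-- def choose_catmull_clark_iters(current_quads, target_quads, max_iters):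
--     if target_quads is None or target_quads <= 0 or current_quads <= 0 or max_iters <= 0:
--         return 0
--     # Candidates current_quads*4**k are strictly increasing, so walk to the
--     # crossover against target_quads instead of scanning every iteration.
--     k = 0
--     cand = current_quads
--     while cand < target_quads and k < max_iters:
--         cand *= 4
--         k += 1
--     if cand < target_quads or k == 0:
--         return k
--     # compare the last candidate below target with the first at-or-above it;
--     # ties go to the smaller iteration count (A's strict-< rule)
--     prev = cand // 4
--     return k - 1 if target_quads - prev <= cand - target_quads else k
-- ===== Notes on version B (the rewrite author's own statement) =====
-- stated objective: faster
-- what changed: Instead of scanning all max_iters iterations and recomputing 4**iters each time, B walks the strictly increasing candidate sequence to its crossover with target_quads (capped at max_iters) and compares only the two candidates around the crossover, keeping A's smaller-iteration tie-break.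
import Mathlib
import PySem

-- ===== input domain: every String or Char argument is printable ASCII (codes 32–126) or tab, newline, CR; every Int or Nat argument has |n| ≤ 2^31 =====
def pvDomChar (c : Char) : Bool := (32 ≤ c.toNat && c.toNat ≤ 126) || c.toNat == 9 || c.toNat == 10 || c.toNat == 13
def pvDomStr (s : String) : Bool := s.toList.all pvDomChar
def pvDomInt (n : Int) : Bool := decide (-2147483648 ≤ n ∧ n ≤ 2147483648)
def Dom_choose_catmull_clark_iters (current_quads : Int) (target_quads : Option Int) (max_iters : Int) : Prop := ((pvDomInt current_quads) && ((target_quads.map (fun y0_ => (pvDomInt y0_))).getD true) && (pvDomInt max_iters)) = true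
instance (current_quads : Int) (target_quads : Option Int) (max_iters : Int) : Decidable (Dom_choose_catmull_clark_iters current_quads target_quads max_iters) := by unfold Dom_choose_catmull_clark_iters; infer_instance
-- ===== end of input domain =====

-- B replaces A's full scan over all iterations by a walk to the crossover of the
-- increasing candidate sequence with the target, comparing only its two neighbours (faster).

-- ===== PORT A =====
def choose_catmull_clark_iters (current_quads : Int) (target_quads : Option Int) (max_iters : Int) : Int :=
  match target_quads with
  | none => 0
  | some t =>
    if t ≤ 0 ∨ current_quads ≤ 0 ∨ max_iters ≤ 0 then 0
    else
      let st := (PySem.List.pyRange 1 (max_iters + 1) 1).foldl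
        (fun (st : Int × Int) iters =>
          -- Python's 4 ** iters; iters ranges over 1..max_iters so iters ≥ 0 and ^ on toNat is exact
          let candidate := current_quads * 4 ^ iters.toNat
          let diff := |candidate - t|
          if diff < st.2 then (iters, diff) else st)
        ((0 : Int), |current_quads - t|)
      st.1

-- ===== PORT B =====
-- the while loop of Source B: multiply by 4 until the candidate reaches the target or the cap
def pvAltLoop (t cand k m : Int) : Int × Int :=
  if h : cand < t ∧ k < m then pvAltLoop t (cand * 4) (k + 1) m else (cand, k)
termination_by (m - k).toNat
decreasing_by omega

def choose_catmull_clark_iters_alt (current_quads : Int) (target_quads : Option Int) (max_iters : Int) : Int :=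
  match target_quads with
  | none => 0
  | some t =>
    if t ≤ 0 ∨ current_quads ≤ 0 ∨ max_iters ≤ 0 then 0
    else
      let r := pvAltLoop t current_quads 0 max_iters
      if r.1 < t ∨ r.2 = 0 then r.2
      else
        let prev := PySem.Int.floordiv r.1 4
        if t - prev ≤ r.1 - t then r.2 - 1 else r.2

-- ===== PRECONDITION & SPEC =====
def Spec_choose_catmull_clark_iters (current_quads : Int) (target_quads : Option Int) (max_iters : Int) (out : Int) : Prop := out = choose_catmull_clark_iters_alt current_quads target_quads max_iters
instance (current_quads : Int) (target_quads : Option Int) (max_iters : Int) (out : Int) : Decidable (Spec_choose_catmull_clark_iters current_quads target_quads max_iters out) := by unfold Spec_choose_catmull_clark_iters; infer_instance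

-- ===== CLAIM (what is proved, stated in full; the proofs are below) =====
def Claim_equal_choose_catmull_clark_iters : Prop := ∀ (current_quads : Int) (target_quads : Option Int) (max_iters : Int), Dom_choose_catmull_clark_iters current_quads target_quads max_iters → Spec_choose_catmull_clark_iters current_quads target_quads max_iters (choose_catmull_clark_iters current_quads target_quads max_iters)

-- ===== LEMMAS AND PROOFS =====

-- earliest argmin of |c*4^k - t| over 0..n, the invariant value of A's fold
def pvBestIter (c t : Int) : Nat → Nat
  | 0 => 0
  | n + 1 => if |c * 4 ^ (n + 1) - t| < |c * 4 ^ (pvBestIter c t n) - t| then n + 1 else pvBestIter c t n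

lemma pvCandMono (c : Int) (hc : 0 < c) {j k : Nat} (h : j < k) : c * 4 ^ j < c * 4 ^ k := by
  have : (4 : Int) ^ j < 4 ^ k := pow_lt_pow_right₀ (by norm_num) h
  exact mul_lt_mul_of_pos_left this hc

lemma pvFoldA (c t : Int) : ∀ n : Nat,
    (PySem.List.pyRange 1 ((n : Int) + 1) 1).foldl
      (fun (st : Int × Int) iters =>
        let candidate := c * 4 ^ iters.toNat
        let diff := |candidate - t|
        if diff < st.2 then (iters, diff) else st) ((0 : Int), |c - t|)
    = ((pvBestIter c t n : Int), |c * 4 ^ pvBestIter c t n - t|) := by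
  intro n
  induction n with
  | zero => simp [PySem.List.pyRange_one_eq_nil, pvBestIter]
  | succ n ih =>
    have hsplit : PySem.List.pyRange 1 (((n + 1 : Nat) : Int) + 1) 1
        = PySem.List.pyRange 1 ((n : Int) + 1) 1 ++ [(n : Int) + 1] := by
      have := PySem.List.pyRange_one_succ_right (a := 1) (b := (n : Int) + 1) (by omega)
      push_cast
      push_cast at this
      convert this using 2
    rw [hsplit, List.foldl_append, ih]
    have htn : ((n : Int) + 1).toNat = n + 1 := by omega
    simp only [pvBestIter]
    split_ifs with h1 <;> simp [h1]

-- all candidates up to n below the target ⟹ the fold keeps moving: best is n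
lemma pvBestIter_all_below (c t : Int) (hc : 0 < c) :
    ∀ n : Nat, (∀ j : Nat, j ≤ n → c * 4 ^ j < t) → pvBestIter c t n = n := by
  intro n
  induction n with
  | zero => intro _; rfl
  | succ n ih =>
    intro hall
    have hb : pvBestIter c t n = n := ih (fun j hj => hall j (by omega))
    have h1 : c * 4 ^ n < t := hall n (by omega)
    have h2 : c * 4 ^ (n + 1) < t := hall (n + 1) (le_refl _)
    have hm : c * 4 ^ n < c * 4 ^ (n + 1) := pvCandMono c hc (by omega)
    simp only [pvBestIter, hb]
    rw [if_pos]
    rw [abs_of_neg (by omega), abs_of_neg (by omega)]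
    omega

-- characterization of the fold's result via the crossover index K
lemma pvBestIter_char (c t : Int) (hc : 0 < c) :
    ∀ (m K : Nat), K ≤ m → (∀ j : Nat, j < K → c * 4 ^ j < t) →
      (t ≤ c * 4 ^ K ∨ (K = m ∧ c * 4 ^ K < t)) →
      pvBestIter c t m =
        (if c * 4 ^ K < t then K
         else if K = 0 then 0
         else if t - c * 4 ^ (K - 1) ≤ c * 4 ^ K - t then K - 1 else K) := by
  intro m
  induction m with
  | zero =>
    intro K hKm _ _
    interval_cases K
    simp [pvBestIter]
  | succ m ih =>
    intro K hKm hbelow hcross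
    rcases Nat.lt_or_ge K (m + 1) with hK | hK
    · -- K ≤ m : crossover already reached; the new candidate only moves further away
      have hKle : K ≤ m := by omega
      have htK : t ≤ c * 4 ^ K := by
        rcases hcross with h | ⟨h, _⟩
        · exact h
        · omega
      have hbm := ih K hKle hbelow (Or.inl htK)
      have hmono : c * 4 ^ K < c * 4 ^ (m + 1) := pvCandMono c hc (by omega)
      have key : ¬ (|c * 4 ^ (m + 1) - t| < |c * 4 ^ (pvBestIter c t m) - t|) := by
        rw [hbm, if_neg (by omega)]
        by_cases hb : K = 0
        · subst hb
          rw [if_pos rfl]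
          simp only [pow_zero, mul_one] at htK hmono ⊢
          rw [abs_of_nonneg (by omega), abs_of_nonneg (by omega)]
          omega
        · rw [if_neg hb]
          have hprev : c * 4 ^ (K - 1) < t := hbelow (K - 1) (by omega)
          split_ifs with hcc
          · rw [abs_of_nonneg (by omega), abs_of_neg (by omega)]
            omega
          · rw [abs_of_nonneg (by omega), abs_of_nonneg (by omega)]
            omega
      have hstep : pvBestIter c t (m + 1) = pvBestIter c t m := by
        simp only [pvBestIter]
        rw [if_neg key]
      rw [hstep, hbm]
    · -- K = m + 1 : everything up to m is below t
      have hKeq : K = m + 1 := by omega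
      subst hKeq
      have hallm : ∀ j : Nat, j ≤ m → c * 4 ^ j < t := fun j hj => hbelow j (by omega)
      have hbm : pvBestIter c t m = m := pvBestIter_all_below c t hc m hallm
      have hm : c * 4 ^ m < t := hallm m (le_refl _)
      have hmono : c * 4 ^ m < c * 4 ^ (m + 1) := pvCandMono c hc (by omega)
      simp only [pvBestIter, hbm]
      rcases hcross with htK | ⟨_, hlt⟩
      · have habs1 : |c * 4 ^ (m + 1) - t| = c * 4 ^ (m + 1) - t := abs_of_nonneg (by omega)
        have habs2 : |c * 4 ^ m - t| = -(c * 4 ^ m - t) := abs_of_neg (by omega)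
        rw [if_neg (show ¬ c * 4 ^ (m + 1) < t by omega),
            if_neg (show ¬ (m + 1 = 0) by omega)]
        simp only [Nat.add_sub_cancel]
        by_cases hcc : t - c * 4 ^ m ≤ c * 4 ^ (m + 1) - t
        · rw [if_pos hcc,
              if_neg (show ¬ |c * 4 ^ (m + 1) - t| < |c * 4 ^ m - t| by omega)]
        · rw [if_neg hcc,
              if_pos (show |c * 4 ^ (m + 1) - t| < |c * 4 ^ m - t| by omega)]
      · have habs1 : |c * 4 ^ (m + 1) - t| = -(c * 4 ^ (m + 1) - t) := abs_of_neg (by omega)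
        have habs2 : |c * 4 ^ m - t| = -(c * 4 ^ m - t) := abs_of_neg (by omega)
        rw [if_pos hlt,
            if_pos (show |c * 4 ^ (m + 1) - t| < |c * 4 ^ m - t| by omega)]

-- characterization of Source B's while loop
lemma pvAltLoop_char (t c m : Int) :
    ∀ (fuel : Nat) (k : Int), (m - k).toNat ≤ fuel → 0 ≤ k → k ≤ m →
      (∀ j : Nat, (j : Int) < k → c * 4 ^ j < t) →
      ∃ K : Nat, pvAltLoop t (c * 4 ^ k.toNat) k m = (c * 4 ^ K, (K : Int)) ∧
        (K : Int) ≤ m ∧ (∀ j : Nat, j < K → c * 4 ^ j < t) ∧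
        (t ≤ c * 4 ^ K ∨ ((K : Int) = m ∧ c * 4 ^ K < t)) := by
  intro fuel
  induction fuel with
  | zero =>
    intro k hfuel hk0 hkm hbelow
    have hkm' : k = m := by omega
    refine ⟨k.toNat, ?_, by omega, fun j hj => hbelow j (by omega), ?_⟩
    · rw [pvAltLoop, dif_neg (by omega), Int.toNat_of_nonneg hk0]
    · by_cases h : t ≤ c * 4 ^ k.toNat
      · exact Or.inl h
      · exact Or.inr ⟨by omega, by omega⟩
  | succ fuel ih =>
    intro k hfuel hk0 hkm hbelow
    rw [pvAltLoop]
    by_cases hcond : c * 4 ^ k.toNat < t ∧ k < m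
    · rw [dif_pos hcond]
      have hnext : c * 4 ^ k.toNat * 4 = c * 4 ^ (k + 1).toNat := by
        have : (k + 1).toNat = k.toNat + 1 := by omega
        rw [this, pow_succ]; ring
      rw [hnext]
      apply ih (k + 1) (by omega) (by omega) (by omega)
      intro j hj
      rcases lt_or_ge (j : Int) k with h | h
      · exact hbelow j h
      · have : j = k.toNat := by omega
        subst this
        exact hcond.1
    · rw [dif_neg hcond]
      refine ⟨k.toNat, by rw [Int.toNat_of_nonneg hk0], by omega, fun j hj => hbelow j (by omega), ?_⟩
      by_cases h : t ≤ c * 4 ^ k.toNat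
      · exact Or.inl h
      · exact Or.inr ⟨by omega, by omega⟩

-- ===== VERDICT (by name: the statement is the Claim_ definition above) =====
theorem choose_catmull_clark_iters_spec : Claim_equal_choose_catmull_clark_iters := by
  intro c tq m _
  unfold Spec_choose_catmull_clark_iters
  cases tq with
  | none => rfl
  | some t =>
    simp only [choose_catmull_clark_iters, choose_catmull_clark_iters_alt]
    by_cases hguard : t ≤ 0 ∨ c ≤ 0 ∨ m ≤ 0
    · rw [if_pos hguard, if_pos hguard]
    · rw [if_neg hguard, if_neg hguard]
      push_neg at hguard
      obtain ⟨ht, hc, hm⟩ := hguard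
      -- A's side
      have hmcast : ((m.toNat : Int) + 1) = m + 1 := by omega
      have hA := pvFoldA c t m.toNat
      rw [hmcast] at hA
      simp only [hA]
      -- B's side
      have hstart : c * 4 ^ (0 : Int).toNat = c := by norm_num
      obtain ⟨K, hloop, hKm, hbelow, hcross⟩ :=
        pvAltLoop_char t c m (m - 0).toNat 0 (le_refl _) (le_refl _) (by omega)
          (by intro j hj; omega)
      rw [hstart] at hloop
      simp only [hloop]
      have hcross' : t ≤ c * 4 ^ K ∨ (K = m.toNat ∧ c * 4 ^ K < t) := by
        rcases hcross with h | ⟨h, h2⟩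
        · exact Or.inl h
        · exact Or.inr ⟨by omega, h2⟩
      have hchar := pvBestIter_char c t hc m.toNat K (by omega) hbelow hcross'
      rw [hchar]
      by_cases hlt : c * 4 ^ K < t
      · rw [if_pos hlt, if_pos (Or.inl hlt)]
      · rw [if_neg hlt]
        by_cases hK0 : K = 0
        · subst hK0
          norm_num
        · rw [if_neg hK0, if_neg (show ¬ (c * 4 ^ K < t ∨ (K : Int) = 0) by omega)]
          have hK1 : 1 ≤ K := Nat.pos_of_ne_zero hK0
          have hfd : PySem.Int.floordiv (c * 4 ^ K) 4 = c * 4 ^ (K - 1) := by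
            rw [PySem.Int.floordiv_eq_iff_of_pos (by norm_num)]
            have : c * 4 ^ (K - 1) * 4 = c * 4 ^ K := by
              rw [mul_assoc, ← pow_succ]
              congr 2
              omega
            constructor
            · omega
            · have h4 : (0:Int) < 4 ^ (K-1) := by positivity
              nlinarith
          rw [hfd]
          split_ifs with hcc
          · omega
          · rfl
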